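-- pv_equiv track=rewrite | github.com/MrBrantCode/unitest_baseline | mut_generate/mist_train_cf/cf_66810/solution.py | f
-- ===== SOURCE A (Python) =====
-- MOD = int(1e9 + 7)
--
-- def f(n):
--     f_values = [0] * ((n // 2) + 1)
--     h_values = [0] * ((n // 2) + 1)
--
--     ans = 0
--     n //= 2
--     for i in range(1, n+1):
--         h_values[i] = n // i - 1
--     for i in range(1, n+1):
--         f_values[i] = (i * (i-1)) // 2
--         j = 2
--         while i * j <= n:
--             f_values[i] -= f_values[i * j]
--             j += 1
--         ans = (ans + i * f_values[i]) % MOD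
--     return ans * 2 % MOD
-- ===== SOURCE B (Python) =====
-- MOD = int(1e9 + 7)
--
-- def f(n):
--     # closed form for 2 * sum_{i=1}^{n//2} i * (i*(i-1)//2)  (the inner
--     # while-subtractions in the original always subtract still-zero entries)
--     m = n // 2
--     if m <= 0:
--         return 0
--     return (m * (m - 1) * (m + 1) * (3 * m + 2) // 12) % MOD
-- ===== Notes on version B (the rewrite author's own statement) =====
-- stated objective: faster
-- what changed: Replaces the O(m log m) array-filling loops (whose inner subtraction only ever subtracts entries that are still zero, so the answer is 2*sum i*C(i,2) for i up to n//2) with the closed-form polynomial m(m-1)(m+1)(3m+2)/12 mod 1e9+7.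
import Mathlib
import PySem

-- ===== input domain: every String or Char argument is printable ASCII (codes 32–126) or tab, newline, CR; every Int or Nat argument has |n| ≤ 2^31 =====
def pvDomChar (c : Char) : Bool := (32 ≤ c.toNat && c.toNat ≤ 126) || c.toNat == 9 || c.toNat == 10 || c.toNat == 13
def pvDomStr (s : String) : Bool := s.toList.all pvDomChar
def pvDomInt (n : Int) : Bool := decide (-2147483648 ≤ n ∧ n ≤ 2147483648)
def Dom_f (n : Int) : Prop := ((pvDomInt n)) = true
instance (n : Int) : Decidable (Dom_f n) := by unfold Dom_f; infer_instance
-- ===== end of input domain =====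

-- B replaces A's two array-filling loops with the closed-form polynomial
-- m(m-1)(m+1)(3m+2)/12 mod 1e9+7 (m = n//2).

-- ===== PORT A =====
def MODL : Int := 1000000007

-- f_values[i] -= f_values[i*j]  (both indices are in range in every actual run, so getD is exact)
def innerA (i : Int) (fv : List Int) (j : Int) : List Int :=
  fv.set i.toNat (fv.getD i.toNat 0 - fv.getD (i*j).toNat 0)

-- one iteration of A's second for-loop; Python's `while i*j <= n: …; j += 1` with i ≥ 1
-- runs exactly for j = 2 .. n//i (the loop condition is monotone in j)
def stepA (m : Int) (st : List Int × Int) (i : Int) : List Int × Int :=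
  let fv1 := st.1.set i.toNat (PySem.Int.floordiv (i*(i-1)) 2)
  let fv2 := (PySem.List.pyRange 2 (PySem.Int.floordiv m i + 1) 1).foldl (innerA i) fv1
  (fv2, PySem.Int.mod (st.2 + i * fv2.getD i.toNat 0) MODL)

def f (n : Int) : Int :=
  let m := PySem.Int.floordiv n 2
  let fv0 : List Int := List.replicate (m+1).toNat 0
  -- h_values loop (dead code in A, kept for faithfulness)
  let _hv := (PySem.List.pyRange 1 (m+1) 1).foldl
      (fun hv i => hv.set i.toNat (PySem.Int.floordiv m i - 1)) (List.replicate (m+1).toNat (0:Int))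
  let st := (PySem.List.pyRange 1 (m+1) 1).foldl (stepA m) (fv0, (0:Int))
  PySem.Int.mod (st.2 * 2) MODL

-- ===== PORT B =====
def f_alt (n : Int) : Int :=
  let m := PySem.Int.floordiv n 2
  if m ≤ 0 then 0
  else PySem.Int.mod (PySem.Int.floordiv (m*(m-1)*(m+1)*(3*m+2)) 12) MODL

-- ===== PRECONDITION & SPEC =====
def Spec_f (n : Int) (out : Int) : Prop := out = f_alt n
instance (n : Int) (out : Int) : Decidable (Spec_f n out) := by unfold Spec_f; infer_instance

-- ===== CLAIM (what is proved, stated in full; the proofs are below) =====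
def Claim_equal_f : Prop := ∀ (n : Int), Dom_f n → Spec_f n (f n)

-- ===== LEMMAS AND PROOFS =====

lemma MODL_pos : (0:Int) < MODL := by unfold MODL; norm_num

-- partial sums of i * ((i*(i-1))//2)
def SInt : Nat → Int
  | 0 => 0
  | (k+1) => SInt k + ((k:Int)+1) * PySem.Int.floordiv (((k:Int)+1)*((k:Int)+1-1)) 2

lemma getD_set_self (l : List Int) (k : Nat) (v : Int) (hk : k < l.length) :
    (l.set k v).getD k 0 = v := by
  simp [List.getD_eq_getElem?_getD, hk]

lemma getD_set_ne (l : List Int) (k d : Nat) (v : Int) (h : k ≠ d) :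
    (l.set k v).getD d 0 = l.getD d 0 := by
  simp [List.getD_eq_getElem?_getD, List.getElem?_set_ne, h]

lemma getD_replicate_zero (n d : Nat) : (List.replicate n (0:Int)).getD d 0 = 0 := by
  simp [List.getD_eq_getElem?_getD, List.getElem?_replicate]
  split <;> rfl

lemma set_getD_self (l : List Int) (k : Nat) : l.set k (l.getD k 0) = l := by
  by_cases hk : k < l.length
  · apply List.ext_getElem?
    intro d
    by_cases h : k = d
    · subst h
      simp [hk, List.getD_eq_getElem?_getD]
    · simp [List.getElem?_set_ne, h]
  · exact List.set_eq_of_length_le (by omega)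

-- the inner while-loop only ever subtracts entries that are still zero, so it is the identity
lemma inner_id (i : Int) (hi : 1 ≤ i) (js : List Int) (hjs : ∀ j ∈ js, 2 ≤ j)
    (fv : List Int) (h0 : ∀ d : Nat, i < (d:Int) → fv.getD d 0 = 0) :
    js.foldl (innerA i) fv = fv := by
  induction js with
  | nil => rfl
  | cons j js ih =>
    have hj : 2 ≤ j := hjs j (by simp)
    have hij : i < ((i*j).toNat : Int) := by
      have h1 : i + 1 ≤ i * j := by nlinarith
      have h2 : ((i*j).toNat : Int) = i * j := Int.toNat_of_nonneg (by nlinarith)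
      omega
    have hz : fv.getD (i*j).toNat 0 = 0 := h0 _ hij
    have hstep : innerA i fv j = fv := by
      rw [innerA, hz, sub_zero, set_getD_self]
    rw [List.foldl_cons, hstep]
    exact ih (fun j hj => hjs j (by simp [hj]))

-- one application of stepA at i = k+1 on a state whose entries beyond k are zero
lemma stepA_spec (m : Int) (k : Nat) (fv : List Int) (a : Int)
    (hlen : fv.length = (m+1).toNat) (hkm : (k:Int) + 1 ≤ m)
    (h0 : ∀ d : Nat, (k:Int) < (d:Int) → fv.getD d 0 = 0) :
    stepA m (fv, a) ((k:Int)+1)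
      = (fv.set (k+1) (PySem.Int.floordiv (((k:Int)+1)*(((k:Int)+1)-1)) 2),
         PySem.Int.mod (a + ((k:Int)+1) * PySem.Int.floordiv (((k:Int)+1)*(((k:Int)+1)-1)) 2) MODL) := by
  have hiN : ((k:Int)+1).toNat = k+1 := by omega
  have hklen : k+1 < fv.length := by omega
  have h0' : ∀ d : Nat, ((k:Int)+1) < (d:Int) →
      (fv.set (k+1) (PySem.Int.floordiv (((k:Int)+1)*(((k:Int)+1)-1)) 2)).getD d 0 = 0 := by
    intro d hd
    rw [getD_set_ne _ _ _ _ (by omega)]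
    exact h0 d (by omega)
  have hinner : (PySem.List.pyRange 2 (PySem.Int.floordiv m ((k:Int)+1) + 1) 1).foldl
      (innerA ((k:Int)+1))
      (fv.set (k+1) (PySem.Int.floordiv (((k:Int)+1)*(((k:Int)+1)-1)) 2))
      = fv.set (k+1) (PySem.Int.floordiv (((k:Int)+1)*(((k:Int)+1)-1)) 2) := by
    refine inner_id _ (by omega) _ ?_ _ h0'
    intro j hj
    rw [PySem.List.mem_pyRange_one] at hj
    exact hj.1
  simp only [stepA, hiN, hinner]
  rw [getD_set_self _ _ _ hklen]

-- invariant of A's main loop: after i = 1..k the accumulator is SInt k % MOD and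
-- all entries of f_values beyond index k are still zero
lemma outer_inv (m : Int) (_hm : 0 ≤ m) (k : Nat) (hk : (k:Int) ≤ m) :
    ∃ fv : List Int,
      (PySem.List.pyRange 1 ((k:Int)+1) 1).foldl (stepA m) (List.replicate (m+1).toNat 0, 0)
        = (fv, PySem.Int.mod (SInt k) MODL)
      ∧ fv.length = (m+1).toNat
      ∧ ∀ d : Nat, (k:Int) < (d:Int) → fv.getD d 0 = 0 := by
  induction k with
  | zero =>
    refine ⟨List.replicate (m+1).toNat 0, ?_, by simp, fun d _ => getD_replicate_zero _ _⟩
    rw [PySem.List.pyRange_one_eq_nil (by norm_num)]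
    simp only [List.foldl_nil, SInt]
    rw [PySem.Int.mod_eq_emod_of_pos MODL_pos]
    simp
  | succ k ih =>
    have hk1 : (k:Int) + 1 ≤ m := by push_cast at hk; omega
    obtain ⟨fv, heq, hlen, h0⟩ := ih (by omega)
    have hrange : PySem.List.pyRange 1 ((((k+1):Nat):Int)+1) 1
        = PySem.List.pyRange 1 ((k:Int)+1) 1 ++ [(k:Int)+1] := by
      push_cast
      rw [PySem.List.pyRange_one_succ_right (by omega)]
    rw [hrange, List.foldl_append, heq]
    simp only [List.foldl_cons, List.foldl_nil]
    rw [stepA_spec m k fv _ hlen hk1 h0]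
    have hmod : PySem.Int.mod (PySem.Int.mod (SInt k) MODL
          + ((k:Int)+1) * PySem.Int.floordiv (((k:Int)+1)*(((k:Int)+1)-1)) 2) MODL
        = PySem.Int.mod (SInt (k+1)) MODL := by
      simp only [PySem.Int.mod_eq_emod_of_pos MODL_pos]
      have hS : SInt (k+1) = SInt k
          + ((k:Int)+1) * PySem.Int.floordiv (((k:Int)+1)*(((k:Int)+1)-1)) 2 := by
        simp [SInt]
      rw [hS, Int.add_emod (SInt k), Int.add_emod (SInt k % MODL), Int.emod_emod_of_dvd _ dvd_rfl]
    rw [hmod]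
    refine ⟨_, rfl, by simp [hlen], ?_⟩
    intro d hd
    rw [getD_set_ne _ _ _ _ (by omega)]
    exact h0 d (by push_cast at hd ⊢; omega)

-- (i*(i-1))//2 is exact division
lemma two_cI (i : Int) : 2 * PySem.Int.floordiv (i*(i-1)) 2 = i * (i-1) := by
  obtain ⟨r, hr⟩ : Even (i * (i-1)) := by
    have h := Int.even_mul_succ_self (i-1)
    simpa [mul_comm] using h
  rw [hr, PySem.Int.floordiv_eq_ediv_of_pos (by norm_num)]
  omega

-- closed form for the accumulated sum
lemma SInt_closed (k : Nat) :
    24 * SInt k = (k:Int) * ((k:Int)-1) * ((k:Int)+1) * (3*(k:Int)+2) := by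
  induction k with
  | zero => simp [SInt]
  | succ k ih =>
    have h2 := two_cI ((k:Int)+1)
    have hstep : SInt (k+1) = SInt k
        + ((k:Int)+1) * PySem.Int.floordiv (((k:Int)+1)*(((k:Int)+1)-1)) 2 := by
      simp [SInt]
    push_cast [hstep]
    push_cast at ih
    linear_combination ih + 12 * ((k:Int)+1) * h2

-- ===== VERDICT (by name: the statement is the Claim_ definition above) =====
theorem f_spec : Claim_equal_f := by
  intro n _
  unfold Spec_f f f_alt
  set m := PySem.Int.floordiv n 2 with hm
  by_cases hm0 : m ≤ 0
  · simp only [hm0, if_pos]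
    rw [PySem.List.pyRange_one_eq_nil (by omega)]
    simp only [List.foldl_nil, zero_mul]
    rw [PySem.Int.mod_eq_emod_of_pos MODL_pos]
    simp
  · rw [if_neg hm0]
    rw [not_le] at hm0
    have hmk : ((m.toNat : Int)) = m := Int.toNat_of_nonneg (by omega)
    obtain ⟨fv, heq, -, -⟩ := outer_inv m (by omega) m.toNat (by omega)
    rw [hmk] at heq
    simp only [heq]
    have hcl := SInt_closed m.toNat
    rw [hmk] at hcl
    have hdiv : PySem.Int.floordiv (m*(m-1)*(m+1)*(3*m+2)) 12 = 2 * SInt m.toNat := by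
      rw [PySem.Int.floordiv_eq_ediv_of_pos (by norm_num), ← hcl]
      omega
    rw [hdiv]
    simp only [PySem.Int.mod_eq_emod_of_pos MODL_pos]
    rw [Int.mul_emod (SInt m.toNat % MODL) 2, Int.emod_emod_of_dvd _ dvd_rfl, ← Int.mul_emod,
      mul_comm (SInt m.toNat) 2]
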